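-- pv_equiv track=rewrite | github.com/KISHOREBM/LeetCode | 1755-defuse-the-bomb/defuse-the-bomb.py | plusd
-- ===== SOURCE A (Python) =====
-- def plusd(code,n):
--     i=0
--     ret=[0]*len(code)
--     while i<len(code):
--         for j in range(n):
--             ret[i]+=code[(i+j+1)%len(code)]
--         i+=1
--     return ret
-- ===== SOURCE B (Python) =====
-- def plusd(code, n):
--     L = len(code)
--     if L == 0:
--         return []
--     if n <= 0:
--         return [0] * L
--     q, r = divmod(n, L)
--     total = 0
--     pre = [0]
--     for x in code:
--         total += x
--         pre.append(total)
--
--     def window(i):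
--         a = i + 1
--         b = a + r
--         if b <= L:
--             s = pre[b] - pre[a]
--         else:
--             s = pre[L] - pre[a] + pre[b - L]
--         return q * total + s
--
--     return [window(i) for i in range(L)]
-- ===== Notes on version B (the rewrite author's own statement) =====
-- stated objective: faster
-- what changed: Replaces A's nested loops (for each index, re-summing the next n circular elements one by one) with a single prefix-sum pass: each output is q*total plus one or two prefix-sum differences for the residual window, computed per index in O(1).
import Mathlib
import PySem

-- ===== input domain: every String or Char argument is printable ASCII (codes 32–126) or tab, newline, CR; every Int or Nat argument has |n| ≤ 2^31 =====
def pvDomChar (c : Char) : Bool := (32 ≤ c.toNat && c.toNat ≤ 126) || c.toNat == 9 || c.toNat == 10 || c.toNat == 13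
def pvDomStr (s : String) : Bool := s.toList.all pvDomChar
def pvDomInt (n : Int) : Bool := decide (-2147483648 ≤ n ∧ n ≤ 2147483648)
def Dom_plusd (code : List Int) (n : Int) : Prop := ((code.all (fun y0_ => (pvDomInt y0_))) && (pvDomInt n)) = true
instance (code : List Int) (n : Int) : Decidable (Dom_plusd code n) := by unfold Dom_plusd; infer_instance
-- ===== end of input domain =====

-- B replaces A's O(len*n) nested loops by a prefix-sum / circular-window computation (O(len+n) work,
-- asymptotically faster); return values are proved identical for every input.


-- ===== PORT A =====
-- while-loop state (i, ret); the index (i+j+1)%len is always in range when the loop runs, so the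
-- total pyGetD/pySetD forms are exact transcriptions of Python's ret[i] += code[(i+j+1)%len(code)].
def plusdGo (code : List Int) (n : Int) (i : Nat) (ret : List Int) : List Int :=
  if i < code.length then
    plusdGo code n (i + 1)
      (PySem.List.pySetD ret (i : Int)
        ((PySem.List.pyRange 0 n 1).foldl
          (fun acc j => acc + PySem.List.pyGetD code (PySem.Int.mod ((i : Int) + j + 1) (code.length : Int)) 0)
          (PySem.List.pyGetD ret (i : Int) 0)))
  else ret
termination_by code.length - i

def plusd (code : List Int) (n : Int) : List Int :=
  plusdGo code n 0 (List.replicate code.length 0)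

-- ===== PORT B =====
def plusd_alt (code : List Int) (n : Int) : List Int :=
  let L := code.length
  if L = 0 then []
  else if n ≤ 0 then List.replicate L 0
  else
    let q := PySem.Int.floordiv n (L : Int)
    let r := PySem.Int.mod n (L : Int)
    let tp := code.foldl (fun (tp : Int × List Int) x => (tp.1 + x, tp.2 ++ [tp.1 + x])) (0, [0])
    let total := tp.1
    let pre := tp.2
    (PySem.List.pyRange 0 (L : Int) 1).map (fun i =>
      let a := i + 1
      let b := a + r
      let s := if b ≤ (L : Int)
        then PySem.List.pyGetD pre b 0 - PySem.List.pyGetD pre a 0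
        else PySem.List.pyGetD pre (L : Int) 0 - PySem.List.pyGetD pre a 0
              + PySem.List.pyGetD pre (b - (L : Int)) 0
      q * total + s)

-- ===== PRECONDITION & SPEC =====
def Spec_plusd (code : List Int) (n : Int) (out : List Int) : Prop := out = plusd_alt code n
instance (code : List Int) (n : Int) (out : List Int) : Decidable (Spec_plusd code n out) := by unfold Spec_plusd; infer_instance

-- ===== CLAIM (what is proved, stated in full; the proofs are below) =====
def Claim_equal_plusd : Prop := ∀ (code : List Int) (n : Int), Dom_plusd code n → Spec_plusd code n (plusd code n)

-- ===== LEMMAS AND PROOFS =====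

-- circular element access: code[t % len]
def ccAt (code : List Int) (t : Nat) : Int := code.getD (t % code.length) 0
-- value A computes at position k for m inner iterations
def avalN (code : List Int) (k m : Nat) : Int := ((List.range m).map (fun j => ccAt code (k + 1 + j))).sum
-- prefix sum
def preAt (code : List Int) (m : Nat) : Int := (code.take m).sum

-- A's inner fold is avalN
lemma foldTerm (code : List Int) (n : Int) (i : Nat) (init : Int) :
    (PySem.List.pyRange 0 n 1).foldl
      (fun acc j => acc + PySem.List.pyGetD code (PySem.Int.mod ((i : Int) + j + 1) (code.length : Int)) 0)
      init = init + avalN code i n.toNat := by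
  rw [PySem.List.pyRange_one]
  simp only [Int.sub_zero]
  rw [List.foldl_map, PySem.List.foldl_add]
  unfold avalN
  congr 1
  apply congrArg List.sum
  apply List.map_congr_left
  intro k hk
  have h1 : (i : Int) + ((0 : Int) + (k : Int)) + 1 = ((i + 1 + k : Nat) : Int) := by push_cast; ring
  rw [h1, PySem.Int.mod_natCast, PySem.List.pyGetD_natCast]
  rfl

lemma set_at_length {α : Type} (pre : List α) (x v : α) (rest : List α) :
    (pre ++ x :: rest).set pre.length v = pre ++ v :: rest := by
  induction pre with
  | nil => rfl
  | cons a l ih => simp [ih]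

-- invariant of A's while loop
lemma go_spec (code : List Int) (n : Int) :
    ∀ (fuel i : Nat) (pre : List Int), pre.length = i → code.length - i ≤ fuel →
    plusdGo code n i (pre ++ List.replicate (code.length - i) 0)
      = pre ++ (List.range (code.length - i)).map (fun t => avalN code (i + t) n.toNat) := by
  intro fuel
  induction fuel with
  | zero =>
    intro i pre hlen hfuel
    subst hlen
    have h0 : code.length - pre.length = 0 := by omega
    rw [plusdGo, if_neg (by omega), h0]
    simp
  | succ fuel ih =>
    intro i pre hlen hfuel
    subst hlen
    by_cases h : pre.length < code.length
    · rw [plusdGo, if_pos h]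
      have hd : code.length - pre.length = (code.length - (pre.length + 1)) + 1 := by omega
      rw [hd, List.replicate_succ, foldTerm]
      have hget : PySem.List.pyGetD
          (pre ++ (0 : Int) :: List.replicate (code.length - (pre.length + 1)) 0)
          ((pre.length : Nat) : Int) 0 = 0 := by
        rw [PySem.List.pyGetD_natCast]
        simp [List.getD_eq_getElem?_getD]
      rw [hget, zero_add, PySem.List.pySetD_natCast, set_at_length]
      rw [show pre ++ avalN code pre.length n.toNat :: List.replicate (code.length - (pre.length + 1)) 0
            = (pre ++ [avalN code pre.length n.toNat]) ++ List.replicate (code.length - (pre.length + 1)) 0 from by simp]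
      rw [show (pre.length + 1) = (pre ++ [avalN code pre.length n.toNat]).length from by simp]
      rw [ih _ (pre ++ [avalN code pre.length n.toNat]) rfl (by simp; omega)]
      simp only [List.length_append, List.length_cons, List.length_nil, Nat.zero_add]
      rw [List.range_succ_eq_map]
      simp only [List.map_cons, Nat.add_zero, List.map_map, List.append_assoc, List.cons_append,
        List.nil_append]
      congr 1
      congr 1
      apply List.map_congr_left
      intro t ht
      simp only [Function.comp_apply]
      congr 1
      omega
    · rw [plusdGo, if_neg h]
      have h0 : code.length - pre.length = 0 := by omega
      rw [h0]
      simp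

lemma plusd_eq_map (code : List Int) (n : Int) :
    plusd code n = (List.range code.length).map (fun k => avalN code k n.toNat) := by
  unfold plusd
  have h := go_spec code n code.length 0 [] rfl (by omega)
  simp only [Nat.sub_zero, List.nil_append, Nat.zero_add] at h
  exact h

-- B's accumulating fold computes (sum, prefix sums)
lemma preFold (xs : List Int) (s : Int) (p : List Int) :
    xs.foldl (fun (tp : Int × List Int) x => (tp.1 + x, tp.2 ++ [tp.1 + x])) (s, p)
      = (s + xs.sum, p ++ (List.range xs.length).map (fun t => s + (xs.take (t + 1)).sum)) := by
  induction xs generalizing s p with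
  | nil => simp
  | cons x xs ih =>
    rw [List.foldl_cons, ih]
    simp only [List.sum_cons, List.length_cons, List.range_succ_eq_map, List.map_cons,
      List.map_map, Prod.mk.injEq]
    constructor
    · ring
    · simp only [List.append_assoc, List.cons_append, List.nil_append, List.take_succ_cons,
        List.sum_cons, List.take_zero, List.sum_nil, add_zero]
      congr 1
      congr 1
      apply List.map_congr_left
      intro t ht
      simp only [Function.comp_apply, Nat.succ_eq_add_one]
      ring

lemma preGet (code : List Int) (m : Nat) (hm : m ≤ code.length) :
    ((0 : Int) :: (List.range code.length).map (fun t => (code.take (t + 1)).sum)).getD m 0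
      = preAt code m := by
  cases m with
  | zero => simp [preAt]
  | succ t =>
    have ht : t < code.length := by omega
    simp [List.getD_eq_getElem?_getD, ht, preAt]

lemma preAt_succ (code : List Int) (m : Nat) (hm : m < code.length) :
    preAt code (m + 1) = preAt code m + code.getD m 0 := by
  unfold preAt
  rw [List.take_add_one, List.getElem?_eq_getElem hm]
  simp only [Option.toList_some, List.sum_append, List.sum_cons, List.sum_nil, add_zero,
    List.getD_eq_getElem?_getD, List.getElem?_eq_getElem hm, Option.getD_some]

-- sum of a run of in-range indices is a prefix-sum difference
lemma run_sum (code : List Int) (a len : Nat) (h : a + len ≤ code.length) :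
    ((List.range len).map (fun j => ccAt code (a + j))).sum = preAt code (a + len) - preAt code a := by
  revert h
  induction len with
  | zero => intro h; simp
  | succ len ih =>
    intro h
    have hlt : a + len < code.length := by omega
    rw [List.range_succ]
    simp only [List.map_append, List.sum_append, List.map_cons, List.map_nil, List.sum_cons,
      List.sum_nil, add_zero]
    rw [ih (by omega)]
    have hc : ccAt code (a + len) = code.getD (a + len) 0 := by
      unfold ccAt; rw [Nat.mod_eq_of_lt hlt]
    rw [hc, show a + (len + 1) = (a + len) + 1 from rfl, preAt_succ code (a + len) hlt]
    ring

-- any L consecutive circular elements sum to the total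
lemma rot_sum (code : List Int) (_hL : 0 < code.length) (s : Nat) :
    ((List.range code.length).map (fun j => ccAt code (s + j))).sum = code.sum := by
  induction s with
  | zero =>
    have h := run_sum code 0 code.length (by omega)
    simpa [preAt] using h
  | succ s ihs =>
    have hmod : ccAt code (s + code.length) = ccAt code s := by
      unfold ccAt; rw [Nat.add_mod_right]
    have h1 : (List.range (code.length + 1)).map (fun j => ccAt code (s + j))
        = ccAt code s :: (List.range code.length).map (fun j => ccAt code (s + 1 + j)) := by
      rw [List.range_succ_eq_map]
      simp only [List.map_cons, Nat.add_zero, List.map_map]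
      congr 1
      apply List.map_congr_left
      intro j hj
      simp only [Function.comp_apply]
      congr 1
      omega
    have h2 : (List.range (code.length + 1)).map (fun j => ccAt code (s + j))
        = (List.range code.length).map (fun j => ccAt code (s + j)) ++ [ccAt code (s + code.length)] := by
      rw [List.range_succ, List.map_append]
      rfl
    have hs := congrArg List.sum (h1.symm.trans h2)
    simp only [List.sum_cons, List.sum_append, List.sum_cons, List.sum_nil, add_zero] at hs
    rw [hmod] at hs
    linarith [ihs, hs]

-- periodicity of the window value
lemma avalN_add_len (code : List Int) (hL : 0 < code.length) (k m : Nat) :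
    avalN code k (m + code.length) = avalN code k m + code.sum := by
  unfold avalN
  rw [List.range_add]
  simp only [List.map_append, List.sum_append, List.map_map]
  congr 1
  have h := rot_sum code hL (k + 1 + m)
  rw [← h]
  apply congrArg List.sum
  apply List.map_congr_left
  intro j hj
  simp only [Function.comp_apply]
  congr 1
  omega

lemma avalN_cycles (code : List Int) (hL : 0 < code.length) (k rn : Nat) :
    ∀ qn : Nat, avalN code k (qn * code.length + rn) = (qn : Int) * code.sum + avalN code k rn := by
  intro qn
  induction qn with
  | zero => simp
  | succ qn ih =>
    rw [show (qn + 1) * code.length + rn = (qn * code.length + rn) + code.length from by ring]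
    rw [avalN_add_len code hL, ih]
    push_cast
    ring

-- the residual window is a (possibly wrapped) prefix-sum difference
lemma avalN_residual (code : List Int) (k rn : Nat) (hk : k < code.length) (hr : rn < code.length) :
    avalN code k rn =
      if k + 1 + rn ≤ code.length then preAt code (k + 1 + rn) - preAt code (k + 1)
      else preAt code code.length - preAt code (k + 1) + preAt code (k + 1 + rn - code.length) := by
  unfold avalN
  by_cases hw : k + 1 + rn ≤ code.length
  · rw [if_pos hw]
    exact run_sum code (k + 1) rn (by omega)
  · rw [if_neg hw]
    have hm : rn = (code.length - (k + 1)) + (rn - (code.length - (k + 1))) := by omega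
    rw [hm, List.range_add]
    simp only [List.map_append, List.sum_append, List.map_map]
    have hfirst := run_sum code (k + 1) (code.length - (k + 1)) (by omega)
    rw [show k + 1 + (code.length - (k + 1)) = code.length from by omega] at hfirst
    rw [hfirst]
    have hsecond : ((List.range (rn - (code.length - (k + 1)))).map
        ((fun j => ccAt code (k + 1 + j)) ∘ (fun j => code.length - (k + 1) + j))).sum
        = preAt code (k + 1 + rn - code.length) - preAt code 0 := by
      have hr := run_sum code 0 (rn - (code.length - (k + 1))) (by omega)
      rw [show (0 : Nat) + (rn - (code.length - (k + 1))) = k + 1 + rn - code.length from by omega] at hr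
      rw [← hr]
      apply congrArg List.sum
      apply List.map_congr_left
      intro j hj
      simp only [Function.comp_apply]
      unfold ccAt
      congr 1
      have : k + 1 + (code.length - (k + 1) + j) = code.length + j := by omega
      rw [this, Nat.add_mod_left]
      have : (0 + j) = j := by omega
      rw [this]
    rw [hsecond]
    have : preAt code 0 = 0 := by simp [preAt]
    rw [this]
    have harg : k + 1 + (code.length - (k + 1) + (rn - (code.length - (k + 1)))) - code.length
        = k + 1 + rn - code.length := by omega
    rw [harg]
    ring

lemma main_eq (code : List Int) (n : Int) : plusd code n = plusd_alt code n := by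
  by_cases hL : code.length = 0
  · rw [plusd_eq_map]
    simp [plusd_alt, hL]
  · by_cases hn : n ≤ 0
    · rw [plusd_eq_map]
      have hnt : n.toNat = 0 := by omega
      rw [hnt]
      simp only [plusd_alt]
      rw [if_neg hL, if_pos hn]
      simp [avalN]
    · have hL' : 0 < code.length := Nat.pos_of_ne_zero hL
      have hn' : 0 < n := by omega
      have hpos : (0 : Int) < (code.length : Int) := by exact_mod_cast hL'
      rw [plusd_eq_map]
      simp only [plusd_alt]
      rw [if_neg hL, if_neg hn, preFold]
      simp only [zero_add, List.singleton_append]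
      rw [PySem.List.pyRange_one]
      simp only [Int.sub_zero, Int.toNat_natCast, List.map_map]
      have hq : PySem.Int.floordiv n (code.length : Int) = n / (code.length : Int) :=
        PySem.Int.floordiv_eq_ediv_of_pos hpos
      have hr : PySem.Int.mod n (code.length : Int) = n % (code.length : Int) :=
        PySem.Int.mod_eq_emod_of_pos hpos
      rw [hq, hr]
      have hr0 : 0 ≤ n % (code.length : Int) := Int.emod_nonneg n (by omega)
      have hrL : n % (code.length : Int) < (code.length : Int) := Int.emod_lt_of_pos n hpos
      have hq0 : 0 ≤ n / (code.length : Int) := Int.ediv_nonneg hn'.le hpos.le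
      have hrn : (((n % (code.length : Int)).toNat : Nat) : Int) = n % (code.length : Int) :=
        Int.toNat_of_nonneg hr0
      have hqn : (((n / (code.length : Int)).toNat : Nat) : Int) = n / (code.length : Int) :=
        Int.toNat_of_nonneg hq0
      set rn := (n % (code.length : Int)).toNat with hrndef
      set qn := (n / (code.length : Int)).toNat with hqndef
      have hsplit : n.toNat = qn * code.length + rn := by
        have h1 := Int.mul_ediv_add_emod n (code.length : Int)
        have h2 : ((qn * code.length + rn : Nat) : Int) = ((n.toNat : Nat) : Int) := by
          push_cast
          rw [hrn, hqn, Int.toNat_of_nonneg hn'.le]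
          linarith
        exact_mod_cast h2.symm
      have hrnL : rn < code.length := by omega
      apply List.map_congr_left
      intro k hk
      have hklt : k < code.length := List.mem_range.mp hk
      rw [hsplit, avalN_cycles code hL' k rn qn, avalN_residual code k rn hklt hrnL]
      have hpre : ∀ m : Nat, m ≤ code.length →
          PySem.List.pyGetD ((0 : Int) :: (List.range code.length).map
            (fun t => (code.take (t + 1)).sum)) ((m : Nat) : Int) 0 = preAt code m := by
        intro m hm
        rw [PySem.List.pyGetD_natCast]
        exact preGet code m hm
      rw [← hrn, ← hqn]
      simp only [Function.comp_apply]
      have e1 : (0 : Int) + (k : Int) + 1 = ((k + 1 : Nat) : Int) := by push_cast; ring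
      have e2 : (0 : Int) + (k : Int) + 1 + ((rn : Nat) : Int) = ((k + 1 + rn : Nat) : Int) := by
        push_cast; ring
      rw [e2, e1]
      rw [hqn]
      by_cases hw : k + 1 + rn ≤ code.length
      · rw [if_pos hw, if_pos (by exact_mod_cast hw : ((k + 1 + rn : Nat) : Int) ≤ (code.length : Int))]
        rw [hpre _ hw, hpre _ (by omega)]
      · rw [if_neg hw, if_neg (by
          intro hcon
          exact hw (by exact_mod_cast hcon))]
        have e3 : ((k + 1 + rn : Nat) : Int) - (code.length : Int)
            = ((k + 1 + rn - code.length : Nat) : Int) := by omega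
        rw [e3]
        rw [hpre _ (by omega), hpre _ (by omega), hpre _ (by omega)]

-- ===== VERDICT (by name: the statement is the Claim_ definition above) =====
theorem plusd_spec : Claim_equal_plusd := by
  intro code n _
  unfold Spec_plusd
  exact main_eq code n
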